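-- pv_equiv track=rewrite | github.com/staffbotsteve/sosfiler | backend/regulatory/research_orchestrator.py | phase_counts
-- ===== SOURCE A (Python) =====
-- from typing import Any
--
-- BATCH_STATUS_QUEUED = "queued"
--
-- def phase_counts(batches: list[dict[str, Any]]) -> dict[str, dict[str, int]]:
--     counts: dict[str, dict[str, int]] = {}
--     for batch in batches:
--         phase = batch.get("phase", "unknown")
--         status = batch.get("status", BATCH_STATUS_QUEUED)
--         counts.setdefault(phase, {})
--         counts[phase][status] = counts[phase].get(status, 0) + 1
--     return counts
-- ===== SOURCE B (Python) =====
-- def phase_counts(batches):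
--     keys = [(b.get("phase", "unknown"), b.get("status", "queued")) for b in batches]
--     result = {}
--     for phase in dict.fromkeys(p for p, _ in keys):
--         sts = [s for p, s in keys if p == phase]
--         result[phase] = {s: sts.count(s) for s in dict.fromkeys(sts)}
--     return result
-- ===== Notes on version B (the rewrite author's own statement) =====
-- stated objective: alternative
-- what changed: Replaces A's single pass that grows a nested dict in place with a two-phase derivation: extract the (phase,status) key list, dedup the phases in first-seen order, and build each phase's row by filtering and counting statuses with list.count, so no nested dict is ever mutated incrementally.
import Mathlib
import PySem

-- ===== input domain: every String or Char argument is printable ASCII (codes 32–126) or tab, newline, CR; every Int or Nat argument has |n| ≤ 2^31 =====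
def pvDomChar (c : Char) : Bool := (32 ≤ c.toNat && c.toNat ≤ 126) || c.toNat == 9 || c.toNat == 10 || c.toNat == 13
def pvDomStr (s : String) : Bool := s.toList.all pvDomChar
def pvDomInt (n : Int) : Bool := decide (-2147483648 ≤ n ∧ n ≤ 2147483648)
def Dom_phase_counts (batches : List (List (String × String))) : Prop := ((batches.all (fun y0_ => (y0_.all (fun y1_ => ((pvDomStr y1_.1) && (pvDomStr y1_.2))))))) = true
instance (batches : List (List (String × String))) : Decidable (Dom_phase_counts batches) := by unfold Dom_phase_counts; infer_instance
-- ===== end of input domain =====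

-- B derives the nested counts declaratively (dedup phases, then filter+count statuses) instead of
-- growing a nested dict entry by entry; same result, no speed claim (objective: alternative).

-- ===== PORT A =====
-- batch.get(k, dflt) on the batch dict (assoc list, first match)
def pcGet (b : List (String × String)) (k dflt : String) : String :=
  (PySem.Dict.mk b).getD k dflt

def phase_counts (batches : List (List (String × String))) : List (String × List (String × Int)) :=
  let counts : PySem.Dict String (PySem.Dict String Int) :=
    batches.foldl (fun counts batch =>
      let phase := pcGet batch "phase" "unknown"
      let status := pcGet batch "status" "queued"
      let counts := counts.setdefault phase PySem.Dict.empty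
      counts.insert phase ((counts.getD phase PySem.Dict.empty).insert status
        ((counts.getD phase PySem.Dict.empty).getD status 0 + 1))) PySem.Dict.empty
  counts.items.map (fun q => (q.1, q.2.items))

-- ===== PORT B =====
def phase_counts_alt (batches : List (List (String × String))) : List (String × List (String × Int)) :=
  let keys := batches.map (fun b => (pcGet b "phase" "unknown", pcGet b "status" "queued"))
  (PySem.List.dedup (keys.map (·.1))).map (fun p =>
    let sts := (keys.filter (fun q => q.1 == p)).map (·.2)
    (p, (PySem.List.dedup sts).map (fun s => (s, (sts.count s : Int)))))

-- ===== PRECONDITION & SPEC =====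
def Spec_phase_counts (batches : List (List (String × String))) (out : List (String × List (String × Int))) : Prop := out = phase_counts_alt batches
instance (batches : List (List (String × String))) (out : List (String × List (String × Int))) : Decidable (Spec_phase_counts batches out) := by unfold Spec_phase_counts; infer_instance

-- ===== CLAIM (what is proved, stated in full; the proofs are below) =====
def Claim_equal_phase_counts : Prop := ∀ (batches : List (List (String × String))), Dom_phase_counts batches → Spec_phase_counts batches (phase_counts batches)

-- ===== LEMMAS AND PROOFS =====

-- the status list of phase p, and B's inner row built from it
def pcSts (ks : List (String × String)) (p : String) : List String :=
  (ks.filter (fun q => q.1 == p)).map (·.2)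

def pcInnerOf (l : List String) : PySem.Dict String Int :=
  PySem.Dict.mk ((PySem.List.dedup l).map (fun s => (s, (l.count s : Int))))

def pcCanon (ks : List (String × String)) : PySem.Dict String (PySem.Dict String Int) :=
  PySem.Dict.mk ((PySem.List.dedup (ks.map (·.1))).map (fun p => (p, pcInnerOf (pcSts ks p))))

-- A's loop body, as a function of the extracted key pair
def pcStep (counts : PySem.Dict String (PySem.Dict String Int)) (phase status : String) :
    PySem.Dict String (PySem.Dict String Int) :=
  let counts := counts.setdefault phase PySem.Dict.empty
  counts.insert phase ((counts.getD phase PySem.Dict.empty).insert status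
    ((counts.getD phase PySem.Dict.empty).getD status 0 + 1))

theorem pc_dedup (l : List String) : PySem.List.dedup l = PySem.Set.ofList l := rfl

theorem pc_contains_map {ν : Type} (xs : List String) (f : String → ν) (s : String) :
    (PySem.Dict.mk (xs.map (fun a => (a, f a)))).contains s = xs.contains s := by
  simp [PySem.Dict.contains, List.any_map, Function.comp_def, List.any_beq']

theorem pc_getD_map {ν : Type} (xs : List String) (f : String → ν) (s : String) (d : ν)
    (hs : s ∈ xs) :
    (PySem.Dict.mk (xs.map (fun a => (a, f a)))).getD s d = f s := by
  induction xs with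
  | nil => cases hs
  | cons a t ih =>
    rw [List.map_cons]
    by_cases h : a = s
    · subst h
      simp [PySem.Dict.getD, PySem.Dict.get?_mk_cons]
    · rcases List.mem_cons.mp hs with rfl | hst
      · exact absurd rfl h
      · have hb : (a == s) = false := by simp [h]
        simp only [PySem.Dict.getD, PySem.Dict.get?_mk_cons, hb] at ih ⊢
        exact ih hst

theorem pcSts_append (ks : List (String × String)) (p s p' : String) :
    pcSts (ks ++ [(p, s)]) p' = pcSts ks p' ++ (if p = p' then [s] else []) := by
  by_cases h : p = p' <;> simp [pcSts, List.filter_append, h]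

theorem pcSts_of_not_mem (ks : List (String × String)) (p : String)
    (hp : p ∉ ks.map (fun q : String × String => q.1)) : pcSts ks p = [] := by
  rw [pcSts, List.filter_eq_nil_iff.mpr, List.map_nil]
  intro q hq
  simp only [beq_iff_eq]
  exact fun h => hp (List.mem_map.mpr ⟨q, hq, h⟩)

theorem pcInner_step (l : List String) (s : String) :
    (pcInnerOf l).insert s ((pcInnerOf l).getD s 0 + 1) = pcInnerOf (l ++ [s]) := by
  have hded : PySem.List.dedup (l ++ [s]) = PySem.Set.add (PySem.List.dedup l) s := by
    rw [pc_dedup, pc_dedup]; exact PySem.Set.ofList_append_singleton l s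
  by_cases hs : s ∈ l
  · have hmem : s ∈ PySem.List.dedup l := by
      rw [pc_dedup]; exact (PySem.Set.mem_ofList l s).mpr hs
    have hc : (pcInnerOf l).contains s = true := by
      rw [pcInnerOf, pc_contains_map]; simpa using hmem
    have hgd : (pcInnerOf l).getD s 0 = (l.count s : Int) :=
      pc_getD_map _ _ _ _ hmem
    apply PySem.Dict.ext
    rw [hgd, PySem.Dict.items_insert_of_contains _ _ hc]
    show ((PySem.List.dedup l).map (fun a => (a, (l.count a : Int)))).map _ = _
    rw [pcInnerOf, hded, PySem.Set.add_of_mem hmem, List.map_map]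
    apply List.map_congr_left
    intro a _
    by_cases h : a = s
    · subst h; simp [List.count_append]
    · have hb : (a == s) = false := by simp [h]
      simp [List.count_append, List.count_singleton, h]
      exact fun hh => h hh.symm
  · have hmem : s ∉ PySem.List.dedup l := by
      rw [pc_dedup]; exact fun hm => hs ((PySem.Set.mem_ofList l s).mp hm)
    have hc : (pcInnerOf l).contains s = false := by
      rw [pcInnerOf, pc_contains_map]
      simpa using hmem
    have hgd : (pcInnerOf l).getD s 0 = 0 :=
      PySem.Dict.getD_of_not_contains _ _ hc
    apply PySem.Dict.ext
    rw [hgd]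
    have hins := PySem.Dict.items_insert_of_not_contains (pcInnerOf l) (0 + 1 : Int) hc
    rw [hins, pcInnerOf, pcInnerOf, hded, PySem.Set.add_of_not_mem hmem, List.map_append]
    congr 1
    · apply List.map_congr_left
      intro a ha
      have hne : a ≠ s := fun h => hmem (h ▸ ha)
      simp [List.count_append, List.count_singleton]
      exact fun hh => hne hh.symm
    · simp [List.count_append, List.count_eq_zero.mpr hs]

theorem pcCanon_step (ks : List (String × String)) (p s : String) :
    pcStep (pcCanon ks) p s = pcCanon (ks ++ [(p, s)]) := by
  have hmapfst : (ks ++ [(p, s)]).map (fun q : String × String => q.1)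
      = ks.map (fun q : String × String => q.1) ++ [p] := by simp
  by_cases hp : p ∈ ks.map (fun q : String × String => q.1)
  · have hmem : p ∈ PySem.List.dedup (ks.map (fun q : String × String => q.1)) := by
      rw [pc_dedup]; exact (PySem.Set.mem_ofList _ p).mpr hp
    have hc : (pcCanon ks).contains p = true := by
      rw [pcCanon, pc_contains_map]; simpa using hmem
    have hgd : (pcCanon ks).getD p PySem.Dict.empty = pcInnerOf (pcSts ks p) :=
      pc_getD_map _ _ _ _ hmem
    rw [pcStep]
    rw [PySem.Dict.setdefault_of_contains _ _ hc, hgd]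
    apply PySem.Dict.ext
    rw [PySem.Dict.items_insert_of_contains _ _ hc]
    show ((PySem.List.dedup _).map (fun a => (a, pcInnerOf (pcSts ks a)))).map _ = _
    rw [pcCanon, hmapfst, pc_dedup, pc_dedup, PySem.Set.ofList_append_singleton,
      PySem.Set.add_of_mem ((pc_dedup _) ▸ hmem), List.map_map]
    apply List.map_congr_left
    intro a _
    by_cases h : a = p
    · subst h
      simp only [Function.comp_def, beq_self_eq_true, if_true]
      rw [pcInner_step, pcSts_append]
      simp
    · have hb : (a == p) = false := by simp [h]
      have hpa : ¬ p = a := fun hh => h hh.symm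
      simp [pcSts_append, hpa]
      exact h
  · have hmem : p ∉ PySem.List.dedup (ks.map (fun q : String × String => q.1)) := by
      rw [pc_dedup]; exact fun hm => hp ((PySem.Set.mem_ofList _ p).mp hm)
    have hc : (pcCanon ks).contains p = false := by
      rw [pcCanon, pc_contains_map]
      simpa using hmem
    rw [pcStep]
    rw [PySem.Dict.setdefault_of_not_contains _ _ hc,
      PySem.Dict.getD_insert_self, PySem.Dict.getD_empty]
    apply PySem.Dict.ext
    rw [PySem.Dict.items_insert_of_contains _ _ (PySem.Dict.contains_insert_self _ _ _),
      PySem.Dict.items_insert_of_not_contains _ _ hc, List.map_append]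
    rw [pcCanon, pcCanon, hmapfst, pc_dedup, pc_dedup, PySem.Set.ofList_append_singleton,
      PySem.Set.add_of_not_mem ((pc_dedup _) ▸ hmem), List.map_append]
    congr 1
    · rw [List.map_map]
      apply List.map_congr_left
      intro a ha
      have hne : a ≠ p := fun h => hmem ((pc_dedup _) ▸ h ▸ ha)
      have hb : (a == p) = false := by simp [hne]
      have hpa : ¬ p = a := fun hh => hne hh.symm
      simp [pcSts_append, hpa]
      exact hne
    · have h1 : pcSts (ks ++ [(p, s)]) p = [s] := by
        rw [pcSts_append, pcSts_of_not_mem ks p hp, if_pos rfl, List.nil_append]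
      have h2 : PySem.Dict.empty.insert s ((0 : Int) + 1) = pcInnerOf [s] := by
        apply PySem.Dict.ext
        rw [PySem.Dict.items_insert_of_not_contains _ _ (PySem.Dict.contains_empty s)]
        simp [pcInnerOf, PySem.Set.ofList, PySem.Set.add, PySem.Dict.empty,
          PySem.Set.empty]
      simp only [List.map_cons, List.map_nil, beq_self_eq_true, if_true, h1, h2]

theorem pcCanon_foldl (ks : List (String × String)) :
    ks.foldl (fun c k => pcStep c k.1 k.2) PySem.Dict.empty = pcCanon ks := by
  induction ks using List.reverseRecOn with
  | nil => rfl
  | append_singleton ks k ih =>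
      rw [List.foldl_append, List.foldl_cons, List.foldl_nil, ih, pcCanon_step]

-- ===== VERDICT (by name: the statement is the Claim_ definition above) =====
theorem phase_counts_spec : Claim_equal_phase_counts := by
  intro batches _
  show phase_counts batches = phase_counts_alt batches
  have e : phase_counts batches
      = ((batches.map (fun b => (pcGet b "phase" "unknown", pcGet b "status" "queued"))).foldl
          (fun c k => pcStep c k.1 k.2) PySem.Dict.empty).items.map (fun q => (q.1, q.2.items)) := by
    rw [List.foldl_map]; rfl
  rw [e, pcCanon_foldl]
  simp only [pcCanon, pcInnerOf, pcSts, phase_counts_alt, List.map_map]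
  rfl
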